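-- pv_equiv track=rewrite | github.com/NONI04/2023_TGwinG_FE_LEEJUNHUN | 이준헌_4주차_과제.py | double
-- ===== SOURCE A (Python) =====
-- def double(lst):
--     sum = 0
--     l = len(lst)
--     for i in range(l):
--         n = lst[i] * 2
--         for j in range(l):
--             if lst[j] == n:
--                 sum += 1
--     return sum
-- ===== SOURCE B (Python) =====
-- def double(lst):
--     cnt = {}
--     for x in lst:
--         cnt[x] = cnt.get(x, 0) + 1
--     return sum(c * cnt.get(2 * v, 0) for v, c in cnt.items())
-- ===== Notes on version B (the rewrite author's own statement) =====
-- stated objective: faster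
-- what changed: Replaces the nested O(n^2) scan with a single frequency-dict pass: count occurrences once, then sum count[v]*count[2v] over the distinct values.
import Mathlib
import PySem

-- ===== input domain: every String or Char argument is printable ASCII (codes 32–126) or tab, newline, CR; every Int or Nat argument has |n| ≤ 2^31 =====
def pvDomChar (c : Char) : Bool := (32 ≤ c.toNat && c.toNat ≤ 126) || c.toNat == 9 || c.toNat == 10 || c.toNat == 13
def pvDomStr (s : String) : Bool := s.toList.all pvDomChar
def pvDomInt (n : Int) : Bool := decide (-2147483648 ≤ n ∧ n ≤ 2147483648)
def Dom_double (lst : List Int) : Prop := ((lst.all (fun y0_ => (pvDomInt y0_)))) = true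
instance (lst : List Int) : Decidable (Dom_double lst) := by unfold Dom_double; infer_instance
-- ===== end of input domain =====

-- B replaces A's nested O(n^2) scan by one frequency-dict pass (count once, then sum count[v]*count[2v] over distinct values).

-- ===== PORT A =====
def double (lst : List Int) : Int :=
  let l := lst.length
  (PySem.List.pyRange 0 (l : Int) 1).foldl (fun sum i =>
    let n := (PySem.List.pyGetD lst i 0) * 2
    (PySem.List.pyRange 0 (l : Int) 1).foldl (fun s j =>
      if PySem.List.pyGetD lst j 0 == n then s + 1 else s) sum) 0

-- ===== PORT B =====
def double_alt (lst : List Int) : Int :=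
  let cnt := lst.foldl (fun d x => d.insert x (d.getD x 0 + 1)) PySem.Dict.empty
  (cnt.items.map (fun p => p.2 * cnt.getD (2 * p.1) 0)).sum

-- ===== PRECONDITION & SPEC =====
def Spec_double (lst : List Int) (out : Int) : Prop := out = double_alt lst
instance (lst : List Int) (out : Int) : Decidable (Spec_double lst out) := by unfold Spec_double; infer_instance

-- ===== CLAIM (what is proved, stated in full; the proofs are below) =====
def Claim_equal_double : Prop := ∀ (lst : List Int), Dom_double lst → Spec_double lst (double lst)

-- ===== LEMMAS AND PROOFS =====

-- A's inner loop counts, over the index range, occurrences of n in lst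
lemma countP_pyGetD (lst : List Int) (n : Int) :
    List.countP (fun j => PySem.List.pyGetD lst j 0 == n) (PySem.List.pyRange 0 (lst.length : Int) 1)
      = List.count n lst := by
  have h := List.countP_map (p := fun x => x == n) (f := fun j => PySem.List.pyGetD lst j 0)
      (l := PySem.List.pyRange 0 (PySem.List.len lst))
  rw [PySem.List.map_pyGetD_pyRange_zero] at h
  exact h.symm

-- summing g over the index range is summing g over the list
lemma sum_map_pyGetD (lst : List Int) (g : Int → Int) :
    (List.map (fun i => g (PySem.List.pyGetD lst i 0)) (PySem.List.pyRange 0 (lst.length : Int) 1)).sum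
      = (lst.map g).sum := by
  conv_rhs => rw [← PySem.List.map_pyGetD_pyRange_zero lst 0, List.map_map]
  rfl

-- A equals the per-element sum of counts of doubles
lemma double_eq_sum (lst : List Int) :
    double lst = (lst.map (fun x => (lst.count (2 * x) : Int))).sum := by
  unfold double
  rw [PySem.List.foldl_congr_mem _ _
      (fun sum i => sum + (lst.count ((PySem.List.pyGetD lst i 0) * 2) : Int)) 0
      (by
        intro acc i _
        simp only [PySem.List.foldl_if_add_one, countP_pyGetD])]
  rw [PySem.List.foldl_add, zero_add]
  rw [show (fun i => (List.count (PySem.List.pyGetD lst i 0 * 2) lst : Int))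
        = fun i => (fun x => (List.count (2 * x) lst : Int)) (PySem.List.pyGetD lst i 0) from
      funext fun i => by rw [mul_comm]]
  simpa using sum_map_pyGetD lst (fun x => (List.count (2 * x) lst : Int))

-- B equals the count-weighted sum over distinct values
lemma double_alt_eq_sum (lst : List Int) :
    double_alt lst =
      ((PySem.Set.ofList lst).map
        (fun k => (lst.count k : Int) * (lst.count (2 * k) : Int))).sum := by
  unfold double_alt
  simp [PySem.Dict.foldl_insert_getD_add_one_eq_counter, PySem.Dict.items_counter,
    PySem.Dict.getD_counter, List.map_map, Function.comp_def]

-- grouping: a per-element sum equals a count-weighted sum over distinct values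
lemma sum_group (lst : List Int) (g : Int → Int) :
    (lst.map g).sum =
      ((PySem.Set.ofList lst).map (fun k => (lst.count k : Int) * g k)).sum := by
  have h1 : ((PySem.Set.ofList lst).map (fun k => (lst.count k : Int) * g k)).sum
      = (PySem.Set.ofList lst).toFinset.sum (fun k => (lst.count k : Int) * g k) :=
    (List.sum_toFinset _ (PySem.Set.nodup_ofList lst)).symm
  have h2 : (PySem.Set.ofList lst).toFinset = lst.toFinset := by
    ext a; simp [List.mem_toFinset, PySem.Set.mem_ofList]
  have h3 := Finset.sum_multiset_map_count (↑lst : Multiset Int) g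
  simp only [Multiset.map_coe, Multiset.sum_coe, Multiset.coe_count] at h3
  rw [h1, h2]
  rw [show (↑lst : Multiset Int).toFinset = lst.toFinset from rfl] at h3
  rw [h3]
  apply Finset.sum_congr rfl
  intro k _
  rw [nsmul_eq_mul]

-- ===== VERDICT (by name: the statement is the Claim_ definition above) =====
theorem double_spec : Claim_equal_double := by
  intro lst _
  show double lst = double_alt lst
  rw [double_eq_sum, double_alt_eq_sum, sum_group lst (fun x => (lst.count (2 * x) : Int))]
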